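-- pv_equiv track=rewrite | github.com/hosoken3/ideation2_example | find_similar_needs.py | _guess_key_by_news
-- ===== SOURCE A (Python) =====
-- from typing import Any, Dict, List, Tuple
--
-- def _guess_key_by_news(news: str, keys: List[str]) -> str | None:
--     """ニュース名から file_name をゆるく推測（完全一致→部分一致）"""
--     news = (news or "").strip().lower()
--     if not news or not keys:
--         return None
--     for k in keys:
--         if news == str(k).strip().lower():
--             return k
--     for k in keys:
--         kk = str(k).strip().lower()
--         if kk in news or news in kk:
--             return k
--     return None
-- ===== SOURCE B (Python) =====
-- def _guess_key_by_news(news, keys):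
--     """Single pass: return on exact match, remember first substring match."""
--     news = (news or "").strip().lower()
--     if not news or not keys:
--         return None
--     first_sub = None
--     for k in keys:
--         kk = str(k).strip().lower()
--         if news == kk:
--             return k
--         if first_sub is None and (kk in news or news in kk):
--             first_sub = k
--     return first_sub
-- ===== Notes on version B (the rewrite author's own statement) =====
-- stated objective: alternative
-- what changed: The two sequential scans (exact-match pass, then substring pass) are fused into one pass that returns immediately on an exact match and remembers the first substring match in an accumulator.
import Mathlib
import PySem

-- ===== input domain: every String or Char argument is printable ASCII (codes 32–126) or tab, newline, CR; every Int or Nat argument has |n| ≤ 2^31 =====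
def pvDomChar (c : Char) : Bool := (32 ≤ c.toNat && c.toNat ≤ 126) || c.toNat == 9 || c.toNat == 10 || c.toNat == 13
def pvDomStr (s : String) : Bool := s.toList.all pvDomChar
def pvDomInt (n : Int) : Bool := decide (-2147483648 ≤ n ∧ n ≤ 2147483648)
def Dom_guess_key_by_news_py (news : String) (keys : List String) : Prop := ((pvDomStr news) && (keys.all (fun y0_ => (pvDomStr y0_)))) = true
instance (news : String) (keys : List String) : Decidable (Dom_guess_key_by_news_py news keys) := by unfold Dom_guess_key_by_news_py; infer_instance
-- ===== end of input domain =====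

-- B fuses A's two scans (exact-match pass, then substring pass) into one pass with a
-- first-substring-match accumulator; same return value, alternative decomposition.

-- ===== PORT A =====
-- first loop of A: exact match
def pvFindExact (n : String) : List String → Option String
  | [] => none
  | k :: ks => if n == PySem.Str.lower (PySem.Str.strip k) then some k else pvFindExact n ks

-- second loop of A: substring match
def pvFindSub (n : String) : List String → Option String
  | [] => none
  | k :: ks =>
      let kk := PySem.Str.lower (PySem.Str.strip k)
      if PySem.Str.isIn kk n || PySem.Str.isIn n kk then some k else pvFindSub n ks

def guess_key_by_news_py (news : String) (keys : List String) : Option String :=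
  -- news = (news or "").strip().lower()  ('or ""' = identity on a falsy/empty string)
  let n := PySem.Str.lower (PySem.Str.strip (if news == "" then "" else news))
  if n == "" || keys.isEmpty then none
  else
    match pvFindExact n keys with
    | some k => some k
    | none => pvFindSub n keys

-- ===== PORT B =====
-- single pass: return on exact match, remember first substring match in acc
def pvOnePass (n : String) : List String → Option String → Option String
  | [], acc => acc
  | k :: ks, acc =>
      let kk := PySem.Str.lower (PySem.Str.strip k)
      if n == kk then some k
      else pvOnePass n ks
        (if acc.isNone && (PySem.Str.isIn kk n || PySem.Str.isIn n kk) then some k else acc)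

def guess_key_by_news_py_alt (news : String) (keys : List String) : Option String :=
  let n := PySem.Str.lower (PySem.Str.strip news)
  if n == "" || keys.isEmpty then none
  else pvOnePass n keys none

-- ===== PRECONDITION & SPEC =====
def Spec_guess_key_by_news_py (news : String) (keys : List String) (out : Option String) : Prop := out = guess_key_by_news_py_alt news keys
instance (news : String) (keys : List String) (out : Option String) : Decidable (Spec_guess_key_by_news_py news keys out) := by unfold Spec_guess_key_by_news_py; infer_instance

-- ===== CLAIM (what is proved, stated in full; the proofs are below) =====
def Claim_equal_guess_key_by_news_py : Prop := ∀ (news : String) (keys : List String), Dom_guess_key_by_news_py news keys → Spec_guess_key_by_news_py news keys (guess_key_by_news_py news keys)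

-- ===== LEMMAS AND PROOFS =====

-- the fused pass equals: exact hit if any, else the accumulator, else the substring hit
theorem pvOnePass_eq (n : String) (ks : List String) (acc : Option String) :
    pvOnePass n ks acc =
      match pvFindExact n ks with
      | some k => some k
      | none => match acc with
        | some a => some a
        | none => pvFindSub n ks := by
  induction ks generalizing acc with
  | nil => cases acc <;> simp [pvOnePass, pvFindExact, pvFindSub]
  | cons k ks ih =>
    simp only [pvOnePass, pvFindExact, pvFindSub]
    by_cases hx : n == PySem.Str.lower (PySem.Str.strip k)
    · simp [hx]
    · simp only [hx, ih]
      cases acc with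
      | some a => simp
      | none =>
        by_cases hs : PySem.Chars.isIn (PySem.Chars.lower (PySem.Chars.strip k.toList)) n.toList = true
            ∨ PySem.Chars.isIn n.toList (PySem.Chars.lower (PySem.Chars.strip k.toList)) = true
        · simp [hs]
        · simp [hs]

theorem guess_or_empty (news : String) :
    (if news == "" then "" else news) = news := by
  by_cases h : news == "" <;> simp_all

-- ===== VERDICT (by name: the statement is the Claim_ definition above) =====
theorem guess_key_by_news_py_spec : Claim_equal_guess_key_by_news_py := by
  intro news keys _
  unfold Spec_guess_key_by_news_py guess_key_by_news_py guess_key_by_news_py_alt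
  rw [guess_or_empty]
  by_cases hg : (PySem.Str.lower (PySem.Str.strip news) == "" || keys.isEmpty) = true
  · simp [hg]
  · simp only [hg, pvOnePass_eq]
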